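-- pv_equiv track=rewrite | github.com/MrBrantCode/unitest_baseline | mut_generate/mist_train_taco/taco_2106/solution.py | determine_coin_order
-- ===== SOURCE A (Python) =====
-- from itertools import permutations
--
-- def determine_coin_order(weightings):
--     a = ['A', 'B', 'C']
--     s = set(weightings)
--
--     for p in permutations(a):
--         fl = True
--         for j in range(3):
--             for k in range(j + 1, 3):
--                 if not (str(p[j]) + '<' + str(p[k]) in s or str(p[k]) + '>' + str(p[j]) in s):
--                     fl = False
--                     break
--             if not fl:
--                 break
--         if fl:
--             return ''.join(p)
--
--     return 'Impossible'
-- ===== SOURCE B (Python) =====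
-- def determine_coin_order(weightings):
--     s = set(weightings)
--
--     def less(x, y):
--         return x + '<' + y in s or y + '>' + x in s
--
--     remaining = ['A', 'B', 'C']
--     out = ''
--     for _ in range(3):
--         pick = None
--         for c in remaining:
--             if all(less(c, r) for r in remaining if r != c):
--                 pick = c
--                 break
--         if pick is None:
--             return 'Impossible'
--         out += pick
--         remaining.remove(pick)
--     return out
-- ===== Notes on version B (the rewrite author's own statement) =====
-- stated objective: simpler
-- what changed: Replaces the enumeration of all 6 permutations with nested pair checks by a greedy selection: three times pick the first remaining coin that weighs less than every other remaining coin.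
import Mathlib
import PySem

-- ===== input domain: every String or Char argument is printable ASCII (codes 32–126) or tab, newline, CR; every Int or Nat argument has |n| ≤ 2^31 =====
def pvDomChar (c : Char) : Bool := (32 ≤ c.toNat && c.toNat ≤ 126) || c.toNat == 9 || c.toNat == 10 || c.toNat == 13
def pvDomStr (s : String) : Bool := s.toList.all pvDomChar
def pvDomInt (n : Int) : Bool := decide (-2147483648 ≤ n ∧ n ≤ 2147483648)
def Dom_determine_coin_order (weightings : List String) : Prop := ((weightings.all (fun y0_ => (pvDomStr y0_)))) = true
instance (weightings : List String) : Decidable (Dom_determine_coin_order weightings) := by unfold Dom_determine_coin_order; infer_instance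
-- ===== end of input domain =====

-- B replaces the 6-permutation enumeration by a greedy selection-sort over the three
-- coins (pick the first remaining coin that weighs less than all other remaining ones);
-- objective: simpler/alternative decomposition, same results proved equal.

-- ===== PORT A =====
-- itertools.permutations of a 3-element list, in CPython's (index-lexicographic) order
def pvPerms3 (a : List String) : List (List String) :=
  let g : Int → String := fun i => PySem.List.pyGetD a i ""
  [[g 0, g 1, g 2], [g 0, g 2, g 1], [g 1, g 0, g 2],
   [g 1, g 2, g 0], [g 2, g 0, g 1], [g 2, g 1, g 0]]

-- inner 'for k in range(j+1, 3)' loop: returns the flag fl (break = return false)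
def pvInnerA (s : PySem.Set String) (p : List String) (j : Int) : List Int → Bool
  | [] => true
  | k :: rest =>
      if !(PySem.Set.contains s (PySem.List.pyGetD p j "" ++ "<" ++ PySem.List.pyGetD p k "") ||
           PySem.Set.contains s (PySem.List.pyGetD p k "" ++ ">" ++ PySem.List.pyGetD p j "")) then
        false
      else pvInnerA s p j rest

-- outer 'for j in range(3)' loop, breaking as soon as fl went false
def pvOuterA (s : PySem.Set String) (p : List String) : List Int → Bool
  | [] => true
  | j :: rest =>
      if pvInnerA s p j (PySem.List.pyRange (j + 1) 3 1) then pvOuterA s p rest else false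

-- 'for p in permutations(a)', returning ''.join(p) on the first valid p
def pvPermLoopA (s : PySem.Set String) : List (List String) → String
  | [] => "Impossible"
  | p :: rest =>
      if pvOuterA s p (PySem.List.pyRange 0 3 1) then PySem.Str.join "" p else pvPermLoopA s rest

def determine_coin_order (weightings : List String) : String :=
  let a := ["A", "B", "C"]
  let s := PySem.Set.ofList weightings
  pvPermLoopA s (pvPerms3 a)

-- ===== PORT B =====
def pvLessB (s : PySem.Set String) (x y : String) : Bool :=
  PySem.Set.contains s (x ++ "<" ++ y) || PySem.Set.contains s (y ++ ">" ++ x)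

-- 'for _ in range(3)': pick the first remaining coin less than every other remaining coin
def pvGoB (s : PySem.Set String) : Nat → List String → String → String
  | 0, _, out => out
  | n + 1, remaining, out =>
      match remaining.find? (fun c => remaining.all (fun r => r == c || pvLessB s c r)) with
      | none => "Impossible"
      | some c => pvGoB s n ((PySem.List.remove? remaining c).getD remaining) (out ++ c)

def determine_coin_order_alt (weightings : List String) : String :=
  pvGoB (PySem.Set.ofList weightings) 3 ["A", "B", "C"] ""

-- ===== PRECONDITION & SPEC =====
def Spec_determine_coin_order (weightings : List String) (out : String) : Prop := out = determine_coin_order_alt weightings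
instance (weightings : List String) (out : String) : Decidable (Spec_determine_coin_order weightings out) := by unfold Spec_determine_coin_order; infer_instance

-- ===== CLAIM (what is proved, stated in full; the proofs are below) =====
def Claim_equal_determine_coin_order : Prop := ∀ (weightings : List String), Dom_determine_coin_order weightings → Spec_determine_coin_order weightings (determine_coin_order weightings)

-- ===== LEMMAS AND PROOFS =====

-- A's pair check over one permutation [x, y, z], as a conjunction of three less-bits
theorem pv_outer_eval (s : PySem.Set String) (x y z : String) :
    pvOuterA s [x, y, z] (PySem.List.pyRange 0 3 1) =
      (pvLessB s x y && pvLessB s x z && pvLessB s y z) := by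
  have hr : PySem.List.pyRange 0 3 1 = [0, 1, 2] := by decide
  have hr1 : PySem.List.pyRange (0 + 1) 3 1 = [1, 2] := by decide
  have hr2 : PySem.List.pyRange (1 + 1) 3 1 = [2] := by decide
  have hr3 : PySem.List.pyRange (2 + 1) 3 1 = [] := by decide
  have hg0 : PySem.List.pyGetD [x, y, z] 0 "" = x := rfl
  have hg1 : PySem.List.pyGetD [x, y, z] 1 "" = y := rfl
  have hg2 : PySem.List.pyGetD [x, y, z] 2 "" = z := rfl
  have e : ∀ u v : String,
      (PySem.Set.contains s (u ++ "<" ++ v) || PySem.Set.contains s (v ++ ">" ++ u)) =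
        pvLessB s u v := fun _ _ => rfl
  simp only [hr, hr1, hr2, hr3, pvOuterA, pvInnerA, hg0, hg1, hg2, e]
  cases pvLessB s x y <;> cases pvLessB s x z <;> cases pvLessB s y z <;> simp

-- the decision tree of A over the six less-bits (a = less A B, b = less B A, c = less A C,
-- d = less C A, e = less B C, f = less C B)
def pvTreeA (a b c d e f : Bool) : String :=
  if a && c && e then "ABC"
  else if c && a && f then "ACB"
  else if b && e && c then "BAC"
  else if e && b && d then "BCA"
  else if d && f && a then "CAB"
  else if f && d && b then "CBA"
  else "Impossible"

theorem pv_A_eval (w : List String) :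
    determine_coin_order w =
      pvTreeA (pvLessB (PySem.Set.ofList w) "A" "B") (pvLessB (PySem.Set.ofList w) "B" "A")
        (pvLessB (PySem.Set.ofList w) "A" "C") (pvLessB (PySem.Set.ofList w) "C" "A")
        (pvLessB (PySem.Set.ofList w) "B" "C") (pvLessB (PySem.Set.ofList w) "C" "B") := by
  have hp : pvPerms3 ["A", "B", "C"] =
      [["A","B","C"], ["A","C","B"], ["B","A","C"], ["B","C","A"], ["C","A","B"], ["C","B","A"]] := by
    decide
  have hj1 : PySem.Str.join "" ["A", "B", "C"] = "ABC" := by decide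
  have hj2 : PySem.Str.join "" ["A", "C", "B"] = "ACB" := by decide
  have hj3 : PySem.Str.join "" ["B", "A", "C"] = "BAC" := by decide
  have hj4 : PySem.Str.join "" ["B", "C", "A"] = "BCA" := by decide
  have hj5 : PySem.Str.join "" ["C", "A", "B"] = "CAB" := by decide
  have hj6 : PySem.Str.join "" ["C", "B", "A"] = "CBA" := by decide
  unfold determine_coin_order
  simp only [hp, pvPermLoopA, pv_outer_eval, hj1, hj2, hj3, hj4, hj5, hj6, pvTreeA]

-- the decision tree of B over the same six less-bits
def pvTreeB (a b c d e f : Bool) : String :=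
  if a && c then
    (if e then "ABC" else if f then "ACB" else "Impossible")
  else if b && e then
    (if c then "BAC" else if d then "BCA" else "Impossible")
  else if d && f then
    (if a then "CAB" else if b then "CBA" else "Impossible")
  else "Impossible"

theorem pv_B_eval (w : List String) :
    determine_coin_order_alt w =
      pvTreeB (pvLessB (PySem.Set.ofList w) "A" "B") (pvLessB (PySem.Set.ofList w) "B" "A")
        (pvLessB (PySem.Set.ofList w) "A" "C") (pvLessB (PySem.Set.ofList w) "C" "A")
        (pvLessB (PySem.Set.ofList w) "B" "C") (pvLessB (PySem.Set.ofList w) "C" "B") := by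
  unfold determine_coin_order_alt
  cases ha : pvLessB (PySem.Set.ofList w) "A" "B" <;>
  cases hb : pvLessB (PySem.Set.ofList w) "B" "A" <;>
  cases hc : pvLessB (PySem.Set.ofList w) "A" "C" <;>
  cases hd : pvLessB (PySem.Set.ofList w) "C" "A" <;>
  cases he : pvLessB (PySem.Set.ofList w) "B" "C" <;>
  cases hf : pvLessB (PySem.Set.ofList w) "C" "B" <;>
  simp [pvGoB, pvTreeB, List.find?, PySem.List.remove?, List.idxOf?, List.findIdx?, List.findIdx?.go, List.eraseIdx, ha, hb, hc, hd, he, hf]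

-- the two trees agree on all 64 bit combinations
theorem pv_tree_eq (a b c d e f : Bool) : pvTreeA a b c d e f = pvTreeB a b c d e f := by
  cases a <;> cases b <;> cases c <;> cases d <;> cases e <;> cases f <;> decide

theorem pv_key (w : List String) :
    determine_coin_order w = determine_coin_order_alt w := by
  rw [pv_A_eval, pv_B_eval, pv_tree_eq]

-- ===== VERDICT (by name: the statement is the Claim_ definition above) =====
theorem determine_coin_order_spec : Claim_equal_determine_coin_order := by
  intro w _
  unfold Spec_determine_coin_order
  exact pv_key w
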